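-- pv_equiv track=rewrite | github.com/vHaYoungv/Algorithm | 프로그래머스/연습문제/Lv 3/최고의 집합.py | bestSet
-- ===== SOURCE A (Python) =====
-- def bestSet(n, s):
--     answer = []
--
--     a = int(s / n)
--     if a == 0:
--         return [-1]
--
--     b = s % n
--     for i in range(n - b):
--         answer.append(a)
--     for i in range(b):
--         answer.append(a + 1)
--
--     return answer
-- ===== SOURCE B (Python) =====
-- def bestSet(n, s):
--     if s // n == 0:
--         return [-1]
--     answer = []
--     while n > 0:
--         q = s // n
--         answer.append(q)
--         s -= q
--         n -= 1
--     return answer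
-- ===== Notes on version B (the rewrite author's own statement) =====
-- stated objective: alternative
-- what changed: Replaces A's precomputed quotient/remainder and two constant-append block loops by a greedy single loop that at each step recomputes the floor of the remaining sum over the remaining count (q = s // n), appends it and subtracts it; no remainder s % n is ever computed.
-- outside the precondition, e.g. on bestSet(2, -5): A returns [-2, -1], B returns [-3, -2]; on bestSet(-3, 1): A returns [-1], B returns []; on bestSet(0, 5): A raises ZeroDivisionError, B raises ZeroDivisionError
import Mathlib
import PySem

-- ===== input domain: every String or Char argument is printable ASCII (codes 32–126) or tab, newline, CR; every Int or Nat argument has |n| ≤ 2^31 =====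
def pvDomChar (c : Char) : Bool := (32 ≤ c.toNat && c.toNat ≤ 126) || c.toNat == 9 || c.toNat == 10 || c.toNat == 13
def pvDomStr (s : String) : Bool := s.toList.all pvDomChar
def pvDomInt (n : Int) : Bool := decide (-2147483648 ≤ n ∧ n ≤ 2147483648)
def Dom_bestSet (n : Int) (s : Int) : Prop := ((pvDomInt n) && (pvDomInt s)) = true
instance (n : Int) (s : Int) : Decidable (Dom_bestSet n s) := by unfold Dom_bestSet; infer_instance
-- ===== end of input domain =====

-- B replaces A's quotient/remainder block loops by a greedy single loop that repeatedly
-- takes the floor of the remaining sum over the remaining count ('alternative');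
-- return-value equivalence proved on the stated Pre_.

-- ===== PORT A =====
-- int(s / n): Python float division then truncation toward zero; within Dom's |·| ≤ 2^31
-- bound the float quotient always truncates to Int.tdiv s n, which is exact here.
def bestSet (n : Int) (s : Int) : List Int :=
  let answer : List Int := []
  let a := Int.tdiv s n
  if a = 0 then [-1]
  else
    let b := PySem.Int.mod s n
    let answer := (PySem.List.pyRange 0 (n - b) 1).foldl (fun acc _ => acc ++ [a]) answer
    let answer := (PySem.List.pyRange 0 b 1).foldl (fun acc _ => acc ++ [a + 1]) answer
    answer

-- ===== PORT B =====
-- B's 'while n > 0' loop with n counting down: encoded as structural recursion on the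
-- fuel n.toNat, exact since the loop runs exactly max(n,0) iterations and in the
-- iteration with fuel k+1 the current Python n equals (k+1 : Int).
def bestSetGo : Nat → Int → List Int
  | 0, _ => []
  | Nat.succ k, s =>
      let q := PySem.Int.floordiv s ((k : Int) + 1)
      q :: bestSetGo k (s - q)

def bestSet_alt (n : Int) (s : Int) : List Int :=
  if PySem.Int.floordiv s n = 0 then [-1]
  else bestSetGo n.toNat s

-- ===== PRECONDITION & SPEC =====
-- Pre_ excludes n = 0, where A raises ZeroDivisionError, and the mixed-sign corners
-- outside the problem's natural domain (n ≥ 1 with s < 0, and n ≤ -1 with 0 < s < -n)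
-- where A's float-truncation/floor-mod mixture yields accidental values (lists not
-- summing to s, or [-1] vs []) that B does not reproduce.
def Pre_bestSet (n : Int) (s : Int) : Prop := (1 ≤ n ∧ 0 ≤ s) ∨ (n ≤ -1 ∧ (s ≤ 0 ∨ -n ≤ s))
instance (n : Int) (s : Int) : Decidable (Pre_bestSet n s) := by unfold Pre_bestSet; infer_instance
def pvWitness_bestSet : Int × Int := (3, 7)

def Spec_bestSet (n : Int) (s : Int) (out : List Int) : Prop := out = bestSet_alt n s
instance (n : Int) (s : Int) (out : List Int) : Decidable (Spec_bestSet n s out) := by unfold Spec_bestSet; infer_instance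

-- ===== CLAIM (what is proved, stated in full; the proofs are below) =====
def Claim_equal_bestSet : Prop := ∀ (n : Int) (s : Int), Dom_bestSet n s → Pre_bestSet n s → Spec_bestSet n s (bestSet n s)

-- ===== LEMMAS AND PROOFS =====

-- A's append loops: folding a constant append over any list is replicate.
theorem foldl_append_const {α β : Type} (l : List α) (init : List β) (c : β) :
    l.foldl (fun acc _ => acc ++ [c]) init = init ++ List.replicate l.length c := by
  induction l generalizing init with
  | nil => simp
  | cons x xs ih => simp [List.foldl, ih, List.replicate_succ, List.append_assoc]

-- B's greedy countdown loop produces the fair split: (k - b) copies of the floor q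
-- followed by b copies of q + 1, where q = s // k, b = s % k.
theorem bestSetGo_eq (k : Nat) : ∀ s : Int, 0 < k →
    bestSetGo k s =
      List.replicate ((k : Int) - PySem.Int.mod s k).toNat (PySem.Int.floordiv s k) ++
      List.replicate (PySem.Int.mod s k).toNat (PySem.Int.floordiv s k + 1) := by
  induction k with
  | zero => intro s h; omega
  | succ k ih =>
      intro s _
      simp only [Nat.cast_add, Nat.cast_one] 
      have hk1 : (0 : Int) < (k : Int) + 1 := by positivity
      set q := PySem.Int.floordiv s ((k : Int) + 1) with hq
      set b := PySem.Int.mod s ((k : Int) + 1) with hb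
      have hsum : q * ((k : Int) + 1) + b = s := PySem.Int.floordiv_mul_add_mod s _
      have hbnn : 0 ≤ b := PySem.Int.mod_nonneg s hk1
      have hblt : b < (k : Int) + 1 := PySem.Int.mod_lt s hk1
      show q :: bestSetGo k (s - q) = _
      rcases Nat.eq_zero_or_pos k with hk0 | hkpos
      · -- k = 0: single element, b = 0, q = s
        subst hk0
        simp only [Nat.cast_zero, zero_add] at *
        have hb0 : b = 0 := by omega
        simp [bestSetGo, hb0]
      · have hkpos' : (0 : Int) < (k : Int) := by exact_mod_cast hkpos
        by_cases hbk : b = (k : Int)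
        · -- remaining sum is (q+1)*k: all remaining elements are q + 1
          have hq' : PySem.Int.floordiv (s - q) (k : Int) = q + 1 := by
            rw [PySem.Int.floordiv_eq_iff_of_pos hkpos']
            constructor <;> nlinarith
          have hm' : PySem.Int.mod (s - q) (k : Int) = 0 := by
            have := PySem.Int.floordiv_mul_add_mod (s - q) (k : Int)
            rw [hq'] at this; nlinarith
          rw [ih (s - q) hkpos, hq', hm']
          simp only [sub_zero, Int.toNat_zero, List.replicate_zero, List.append_nil]
          rw [hbk, show ((k : Int) + 1 - (k : Int)).toNat = 1 from by omega]
          simp [List.replicate_succ]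
        · -- b < k: the floor of the remaining sum is still q, remainder still b
          have hq' : PySem.Int.floordiv (s - q) (k : Int) = q := by
            rw [PySem.Int.floordiv_eq_iff_of_pos hkpos']
            constructor <;> nlinarith [lt_of_le_of_ne (by omega : b ≤ (k : Int)) hbk]
          have hm' : PySem.Int.mod (s - q) (k : Int) = b := by
            have := PySem.Int.floordiv_mul_add_mod (s - q) (k : Int)
            rw [hq'] at this; nlinarith
          rw [ih (s - q) hkpos, hq', hm']
          have h1 : ((k : Int) + 1 - b).toNat = ((k : Int) - b).toNat + 1 := by omega
          rw [h1]
          simp [List.replicate_succ]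

theorem bestSet_spec_aux (n s : Int) (hn : 1 ≤ n) (hs : 0 ≤ s) :
    bestSet n s = bestSet_alt n s := by
  have hpos : 0 < n := hn
  have htd : Int.tdiv s n = PySem.Int.floordiv s n := by
    rw [PySem.Int.floordiv_eq_ediv_of_pos hpos, Int.tdiv_eq_ediv_of_nonneg hs]
  set q := PySem.Int.floordiv s n with hq
  set b := PySem.Int.mod s n with hb
  have hbnn : 0 ≤ b := PySem.Int.mod_nonneg s hpos
  have hblt : b < n := PySem.Int.mod_lt s hpos
  unfold bestSet bestSet_alt
  rw [htd, ← hq, ← hb]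
  by_cases hq0 : q = 0
  · simp [hq0]
  · simp only [if_neg hq0]
    have hcast : ((n.toNat : Int)) = n := Int.toNat_of_nonneg (by omega)
    have hgo := bestSetGo_eq n.toNat s (by omega)
    rw [hcast, ← hq, ← hb] at hgo
    rw [hgo, foldl_append_const, foldl_append_const, List.nil_append,
      PySem.List.length_pyRange_one, PySem.List.length_pyRange_one]
    simp

-- negative n: when neither guard fires, both programs build an empty list
theorem bestSet_neg_empty (n s : Int) (hn : n ≤ -1)
    (hA : Int.tdiv s n ≠ 0) (hB : PySem.Int.floordiv s n ≠ 0) :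
    bestSet n s = [] ∧ bestSet_alt n s = [] := by
  have hb := PySem.Int.mod_neg_bounds s (show n < 0 by omega)
  have htn : n.toNat = 0 := by omega
  simp only [bestSet, bestSet_alt, if_neg hA, if_neg hB, htn]
  refine ⟨?_, rfl⟩
  rw [PySem.List.pyRange_one_eq_nil (by omega), PySem.List.pyRange_one_eq_nil (by omega)]
  rfl

-- negative n, inside Pre_: the two guards int(s/n)==0 and s//n==0 agree
theorem guard_iff_neg (n s : Int) (hn : n ≤ -1) (hcase : s ≤ 0 ∨ -n ≤ s) :
    (Int.tdiv s n = 0 ↔ PySem.Int.floordiv s n = 0) := by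
  have hbnds := PySem.Int.mod_neg_bounds s (show n < 0 by omega)
  have hsum := PySem.Int.floordiv_mul_add_mod s n
  set q := PySem.Int.floordiv s n with hq
  set b := PySem.Int.mod s n with hb
  rcases hcase with hs | hs
  · -- s ≤ 0: both guards hold exactly when n < s
    have h1 : Int.tdiv s n = (-s) / (-n) := by
      have e1 : Int.tdiv (-s) (-n) = -(Int.tdiv (-s) n) := Int.tdiv_neg (-s) n
      have e2 : Int.tdiv (-s) n = -(Int.tdiv s n) := Int.neg_tdiv s n
      have e3 : Int.tdiv (-s) (-n) = (-s) / (-n) := Int.tdiv_eq_ediv_of_nonneg (by omega)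
      omega
    have htd : Int.tdiv s n = 0 ↔ n < s := by
      rw [h1]
      constructor
      · intro h0
        by_contra hlt
        have : (1 : Int) ≤ (-s) / (-n) :=
          (Int.le_ediv_iff_mul_le (by omega)).2 (by omega)
        omega
      · intro h
        exact Int.ediv_eq_zero_of_lt (by omega) (by omega)
    have hfd : q = 0 ↔ n < s := by
      constructor
      · intro h0; rw [h0] at hsum; omega
      · intro h
        by_contra h0
        rcases (by omega : q ≤ -1 ∨ 1 ≤ q) with hqs | hqs
        · nlinarith [hsum, hbnds.1, hbnds.2]
        · nlinarith [hsum, hbnds.1, hbnds.2]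
    rw [htd, hfd]
  · -- -n ≤ s (so s ≥ 1): both guards are false
    have ht2 : Int.tdiv s (-n) = s / (-n) := Int.tdiv_eq_ediv_of_nonneg (by omega)
    have ht3 : Int.tdiv s (-n) = -(Int.tdiv s n) := Int.tdiv_neg s n
    have hge : (1 : Int) ≤ s / (-n) := (Int.le_ediv_iff_mul_le (by omega)).2 (by omega)
    have htA : Int.tdiv s n ≠ 0 := by omega
    have htB : q ≠ 0 := by
      intro h0; rw [h0] at hsum; simp at hsum; omega
    constructor <;> intro h <;> [exact absurd h htA; exact absurd h htB]

theorem bestSet_spec_aux_neg (n s : Int) (hn : n ≤ -1) (hcase : s ≤ 0 ∨ -n ≤ s) :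
    bestSet n s = bestSet_alt n s := by
  by_cases h0 : Int.tdiv s n = 0
  · have h0' : PySem.Int.floordiv s n = 0 := (guard_iff_neg n s hn hcase).1 h0
    unfold bestSet bestSet_alt
    rw [if_pos h0, if_pos h0']
  · have h0' : PySem.Int.floordiv s n ≠ 0 :=
      fun h => h0 ((guard_iff_neg n s hn hcase).2 h)
    have he := bestSet_neg_empty n s hn h0 h0'
    rw [he.1, he.2]

-- ===== VERDICT (by name: the statement is the Claim_ definition above) =====
theorem bestSet_spec : Claim_equal_bestSet := by
  intro n s _ hpre
  rcases hpre with ⟨hn, hs⟩ | ⟨hn, hcase⟩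
  · exact bestSet_spec_aux n s hn hs
  · exact bestSet_spec_aux_neg n s hn hcase
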